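-- pv_equiv track=rewrite | github.com/MokshitBindal/Aegis | aegis-server/internal/analysis/incident_aggregator.py | _are_attack_types_related
-- ===== SOURCE A (Python) =====
-- def _are_attack_types_related(rule1: str, rule2: str) -> bool:
--     """
--     Check if two rule types are related attack patterns.
--     """
--     # Define rule families
--     brute_force_rules = [
--         'SSH Failed Login Attempts',
--         'Distributed Brute Force Attack',
--         'Agent: SSH Brute Force Detected',
--     ]
--     escalation_rules = ['Privilege Escalation Attempt']
--     resource_rules = [
--         'Coordinated Resource Spike',
--         'Agent: Sustained High CPU Usage',
--     ]
--
--     # Check if both rules are in the same family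
--     for family in [brute_force_rules, escalation_rules, resource_rules]:
--         if rule1 in family and rule2 in family:
--             return True
--
--     return False
-- ===== SOURCE B (Python) =====
-- # Materialize the relatedness relation itself: the set of all ordered pairs of
-- # rules drawn from the same family, built once; the function is a single pair
-- # membership test.
-- _FAMILIES = [
--     [
--         'SSH Failed Login Attempts',
--         'Distributed Brute Force Attack',
--         'Agent: SSH Brute Force Detected',
--     ],
--     ['Privilege Escalation Attempt'],
--     [
--         'Coordinated Resource Spike',
--         'Agent: Sustained High CPU Usage',
--     ],
-- ]
--
-- _RELATED_PAIRS = frozenset(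
--     (a, b) for fam in _FAMILIES for a in fam for b in fam
-- )
--
--
-- def _are_attack_types_related(rule1: str, rule2: str) -> bool:
--     return (rule1, rule2) in _RELATED_PAIRS
-- ===== Notes on version B (the rewrite author's own statement) =====
-- stated objective: alternative
-- what changed: Instead of looping over family lists and running two membership tests per family, B materializes the relatedness relation itself as a precomputed frozenset of all same-family ordered pairs; each call is a single membership test of the (rule1, rule2) tuple, correct because two rules are related exactly when the pair lies in some family's Cartesian square.
import Mathlib
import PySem

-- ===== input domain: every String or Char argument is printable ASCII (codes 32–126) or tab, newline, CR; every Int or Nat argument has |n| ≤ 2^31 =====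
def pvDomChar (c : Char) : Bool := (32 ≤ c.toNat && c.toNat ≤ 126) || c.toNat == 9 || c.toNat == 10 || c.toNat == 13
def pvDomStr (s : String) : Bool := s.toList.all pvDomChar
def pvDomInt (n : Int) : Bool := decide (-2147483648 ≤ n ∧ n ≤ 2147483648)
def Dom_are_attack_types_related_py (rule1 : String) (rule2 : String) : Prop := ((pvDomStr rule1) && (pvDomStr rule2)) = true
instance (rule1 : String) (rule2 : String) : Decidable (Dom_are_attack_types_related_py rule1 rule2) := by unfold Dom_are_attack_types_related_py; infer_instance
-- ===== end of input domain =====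

-- B materializes the relatedness relation as a precomputed set of all same-family
-- ordered pairs; each call is one membership test of the (rule1, rule2) pair (alternative decomposition).

-- ===== PORT A =====
def pvBruteForceRules : List String :=
  ["SSH Failed Login Attempts", "Distributed Brute Force Attack", "Agent: SSH Brute Force Detected"]
def pvEscalationRules : List String := ["Privilege Escalation Attempt"]
def pvResourceRules : List String :=
  ["Coordinated Resource Spike", "Agent: Sustained High CPU Usage"]

-- the 'for family in …' loop with early return
def pvFamilyLoop (families : List (List String)) (rule1 rule2 : String) : Bool :=
  match families with
  | [] => false
  | fam :: rest =>
      if fam.contains rule1 && fam.contains rule2 then true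
      else pvFamilyLoop rest rule1 rule2

def are_attack_types_related_py (rule1 : String) (rule2 : String) : Bool :=
  pvFamilyLoop [pvBruteForceRules, pvEscalationRules, pvResourceRules] rule1 rule2

-- ===== PORT B =====
def pvFamilies : List (List String) :=
  [["SSH Failed Login Attempts", "Distributed Brute Force Attack", "Agent: SSH Brute Force Detected"],
   ["Privilege Escalation Attempt"],
   ["Coordinated Resource Spike", "Agent: Sustained High CPU Usage"]]

-- frozenset((a, b) for fam in _FAMILIES for a in fam for b in fam)
def pvRelatedPairs : PySem.Set (String × String) :=
  PySem.Set.ofList (pvFamilies.flatMap (fun fam => fam.flatMap (fun a => fam.map (fun b => (a, b)))))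

def are_attack_types_related_py_alt (rule1 : String) (rule2 : String) : Bool :=
  PySem.Set.contains pvRelatedPairs (rule1, rule2)

-- ===== PRECONDITION & SPEC =====
def Spec_are_attack_types_related_py (rule1 : String) (rule2 : String) (out : Bool) : Prop := out = are_attack_types_related_py_alt rule1 rule2
instance (rule1 : String) (rule2 : String) (out : Bool) : Decidable (Spec_are_attack_types_related_py rule1 rule2 out) := by unfold Spec_are_attack_types_related_py; infer_instance

-- ===== CLAIM =====
def Claim_equal_are_attack_types_related_py : Prop := ∀ (rule1 : String) (rule2 : String), Dom_are_attack_types_related_py rule1 rule2 → Spec_are_attack_types_related_py rule1 rule2 (are_attack_types_related_py rule1 rule2)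

-- ===== LEMMAS AND PROOFS =====
set_option maxHeartbeats 2000000 in
theorem pv_agree (rule1 rule2 : String) :
    are_attack_types_related_py rule1 rule2 = are_attack_types_related_py_alt rule1 rule2 := by
  simp only [are_attack_types_related_py, are_attack_types_related_py_alt, pvFamilyLoop,
    pvBruteForceRules, pvEscalationRules, pvResourceRules, pvRelatedPairs, pvFamilies,
    PySem.Set.ofList, PySem.Set.contains,
    List.flatMap, List.map, List.contains_cons, List.contains_nil]
  by_cases h0 : rule1 = "SSH Failed Login Attempts" <;>
  by_cases h1 : rule1 = "Distributed Brute Force Attack" <;>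
  by_cases h2 : rule1 = "Agent: SSH Brute Force Detected" <;>
  by_cases h3 : rule1 = "Privilege Escalation Attempt" <;>
  by_cases h4 : rule1 = "Coordinated Resource Spike" <;>
  by_cases h5 : rule1 = "Agent: Sustained High CPU Usage" <;>
    simp_all

-- ===== VERDICT =====
theorem are_attack_types_related_py_spec : Claim_equal_are_attack_types_related_py := by
  intro rule1 rule2 _
  unfold Spec_are_attack_types_related_py
  exact pv_agree rule1 rule2
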